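-- pv_equiv track=rewrite | github.com/sehgal-vip/travel-agent | src/telegram/nudge.py | format_nudge_message
-- ===== SOURCE A (Python) =====
-- def format_nudge_message(nudges: list[dict]) -> str:
--     """Format nudges into a single message for the user."""
--     if not nudges:
--         return ""
--
--     # Sort by priority
--     priority_order = {"high": 0, "medium": 1, "low": 2}
--     nudges.sort(key=lambda n: priority_order.get(n.get("priority", "low"), 2))
--
--     parts = ["Hey! A few things to keep in mind:\n"]
--     for nudge in nudges[:5]:  # Cap at 5 nudges
--         parts.append(nudge["message"])
--
--     return "\n\n".join(parts)
-- ===== SOURCE B (Python) =====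
-- def format_nudge_message(nudges: list[dict]) -> str:
--     """Format nudges into a single message for the user."""
--     if not nudges:
--         return ""
--
--     # One pass: bucket by priority instead of sorting (stable order preserved).
--     high, medium, low = [], [], []
--     for nudge in nudges:
--         p = nudge.get("priority", "low")
--         if p == "high":
--             high.append(nudge)
--         elif p == "medium":
--             medium.append(nudge)
--         else:
--             low.append(nudge)
--     nudges[:] = high + medium + low  # same in-place reorder as A's stable sort
--
--     return "\n\n".join(["Hey! A few things to keep in mind:\n"]
--                        + [nudge["message"] for nudge in nudges[:5]])
-- ===== Notes on version B (the rewrite author's own statement) =====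
-- stated objective: alternative
-- what changed: Replaces the comparison sort under a 3-value priority key by a single bucketing pass into high/medium/low lists whose concatenation reproduces the stable sorted order (and the same in-place reorder via nudges[:] = ...).
import Mathlib
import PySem

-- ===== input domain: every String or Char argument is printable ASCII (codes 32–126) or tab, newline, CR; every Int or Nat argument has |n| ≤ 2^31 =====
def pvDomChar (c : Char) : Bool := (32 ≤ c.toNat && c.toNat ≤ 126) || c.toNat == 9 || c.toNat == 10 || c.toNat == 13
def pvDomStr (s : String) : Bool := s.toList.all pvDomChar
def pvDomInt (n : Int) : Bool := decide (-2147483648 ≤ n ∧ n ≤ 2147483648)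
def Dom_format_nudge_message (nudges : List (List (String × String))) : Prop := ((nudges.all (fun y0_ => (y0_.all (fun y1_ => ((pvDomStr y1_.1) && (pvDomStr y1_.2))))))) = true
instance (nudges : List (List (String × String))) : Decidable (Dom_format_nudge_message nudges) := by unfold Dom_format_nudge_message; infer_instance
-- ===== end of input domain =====

-- B replaces A's sort under a 3-value priority key by one bucketing pass (high/medium/low)
-- whose concatenation is the same stable order; the Python B performs the same in-place
-- reorder of `nudges` via `nudges[:] = ...`, so side effects match too.

-- ===== PORT A =====
-- n.get("priority", "low")
def pvPrio (n : List (String × String)) : String :=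
  (PySem.Dict.ofList n).getD "priority" "low"

-- priority_order.get(n.get("priority", "low"), 2)
def pvKeyA (n : List (String × String)) : Int :=
  (PySem.Dict.ofList [("high", (0 : Int)), ("medium", 1), ("low", 2)]).getD (pvPrio n) 2

-- nudge["message"] raises KeyError on a missing key; under Pre_ every nudge reached by the
-- loop (the first five in priority order) has the key, so getD with a dummy default is exact.
def format_nudge_message (nudges : List (List (String × String))) : String :=
  if nudges = [] then ""
  else
    let sortedNudges := PySem.List.sorted nudges pvKeyA false
    let parts := (PySem.List.slice sortedNudges none (some 5)).foldl
        (fun ps n => ps ++ [(PySem.Dict.ofList n).getD "message" ""])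
        ["Hey! A few things to keep in mind:\n"]
    PySem.Str.join "\n\n" parts

-- ===== PORT B =====
-- B's own transcription of n.get("priority", "low")
def pvPrioB (n : List (String × String)) : String :=
  (PySem.Dict.ofList n).getD "priority" "low"

def pvStep
    (acc : List (List (String × String)) × List (List (String × String)) × List (List (String × String)))
    (n : List (String × String)) :
    List (List (String × String)) × List (List (String × String)) × List (List (String × String)) :=
  let p := pvPrioB n
  if p = "high" then (acc.1 ++ [n], acc.2.1, acc.2.2)
  else if p = "medium" then (acc.1, acc.2.1 ++ [n], acc.2.2)
  else (acc.1, acc.2.1, acc.2.2 ++ [n])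

def format_nudge_message_alt (nudges : List (List (String × String))) : String :=
  if nudges = [] then ""
  else
    let buckets := nudges.foldl pvStep ([], [], [])
    let ns := buckets.1 ++ (buckets.2.1 ++ buckets.2.2)
    PySem.Str.join "\n\n"
      (["Hey! A few things to keep in mind:\n"] ++
        (PySem.List.slice ns none (some 5)).map (fun n => (PySem.Dict.ofList n).getD "message" ""))

-- ===== PRECONDITION & SPEC =====
-- helpers naming the three priority buckets (used by Pre_ and the proofs)
def pvH (xs : List (List (String × String))) : List (List (String × String)) :=
  xs.filter (fun n => pvPrio n = "high")
def pvM (xs : List (List (String × String))) : List (List (String × String)) :=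
  xs.filter (fun n => pvPrio n = "medium")
def pvL (xs : List (List (String × String))) : List (List (String × String)) :=
  xs.filter (fun n => ¬ pvPrio n = "high" ∧ ¬ pvPrio n = "medium")

-- Pre_ excludes exactly the inputs on which A (and B alike) raises KeyError: some nudge
-- among the first five in priority order (high, then medium, then the rest, each in
-- original order) lacks the "message" key.
def Pre_format_nudge_message (nudges : List (List (String × String))) : Prop :=
  ∀ n ∈ (pvH nudges ++ (pvM nudges ++ pvL nudges)).take 5,
    (PySem.Dict.ofList n).contains "message" = true
instance (nudges : List (List (String × String))) : Decidable (Pre_format_nudge_message nudges) := by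
  unfold Pre_format_nudge_message; infer_instance

def pvWitness_format_nudge_message : (List (List (String × String))) :=
  [[("priority", "high"), ("message", "hi")], [("message", "later")]]

def Spec_format_nudge_message (nudges : List (List (String × String))) (out : String) : Prop := out = format_nudge_message_alt nudges
instance (nudges : List (List (String × String))) (out : String) : Decidable (Spec_format_nudge_message nudges out) := by unfold Spec_format_nudge_message; infer_instance

-- ===== CLAIM (what is proved, stated in full; the proofs are below) =====
def Claim_equal_format_nudge_message : Prop := ∀ (nudges : List (List (String × String))), Dom_format_nudge_message nudges → Pre_format_nudge_message nudges → Spec_format_nudge_message nudges (format_nudge_message nudges)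

-- ===== LEMMAS AND PROOFS =====
theorem pvKeyA_char (n : List (String × String)) :
    pvKeyA n = if pvPrio n = "high" then 0 else if pvPrio n = "medium" then 1 else 2 := by
  have hd : PySem.Dict.ofList [("high", (0 : Int)), ("medium", 1), ("low", 2)]
      = PySem.Dict.mk [("high", 0), ("medium", 1), ("low", 2)] := by decide
  unfold pvKeyA
  rw [hd]
  by_cases h1 : pvPrio n = "high"
  · simp [h1, PySem.Dict.getD, PySem.Dict.get?_mk_cons]
  · by_cases h2 : pvPrio n = "medium"
    · simp [h2, PySem.Dict.getD, PySem.Dict.get?_mk_cons]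
    · have e1 : ("high" == pvPrio n) = false := beq_eq_false_iff_ne.mpr (Ne.symm h1)
      have e2 : ("medium" == pvPrio n) = false := beq_eq_false_iff_ne.mpr (Ne.symm h2)
      by_cases h3 : pvPrio n = "low"
      · simp [h3, PySem.Dict.getD, PySem.Dict.get?_mk_cons]
      · have e3 : ("low" == pvPrio n) = false := beq_eq_false_iff_ne.mpr (Ne.symm h3)
        simp [h1, h2, PySem.Dict.getD, e1, e2, e3, PySem.Dict.get?]

theorem pvInsertBy_skip {α : Type} (before : α → α → Bool) (x : α) (P S : List α)
    (hP : ∀ y ∈ P, before x y = false) :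
    PySem.List.insertBy before x (P ++ S) = P ++ PySem.List.insertBy before x S := by
  induction P with
  | nil => simp
  | cons p P ih =>
    have hp : before x p = false := hP p (by simp)
    simp [PySem.List.insertBy, hp, ih (fun y hy => hP y (by simp [hy]))]

theorem pvInsertBy_front {α : Type} (before : α → α → Bool) (x : α) (S : List α)
    (hS : ∀ y ∈ S, before x y = true) :
    PySem.List.insertBy before x S = x :: S := by
  cases S with
  | nil => rfl
  | cons s S => simp [PySem.List.insertBy, hS s (by simp)]

theorem pvInsertBy_last {α : Type} (before : α → α → Bool) (x : α) (S : List α)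
    (hS : ∀ y ∈ S, before x y = false) :
    PySem.List.insertBy before x S = S ++ [x] := by
  induction S with
  | nil => rfl
  | cons s S ih =>
    simp [PySem.List.insertBy, hS s (by simp), ih (fun y hy => hS y (by simp [hy]))]

theorem pvSortFold (xs : List (List (String × String))) :
    ∀ (h m l : List (List (String × String))),
      (∀ y ∈ h, pvKeyA y = 0) → (∀ y ∈ m, pvKeyA y = 1) → (∀ y ∈ l, pvKeyA y = 2) →
      xs.foldl (fun acc x => PySem.List.insertBy (fun a b => decide (pvKeyA a < pvKeyA b)) x acc)
        (h ++ (m ++ l))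
      = (h ++ pvH xs) ++ ((m ++ pvM xs) ++ (l ++ pvL xs)) := by
  induction xs with
  | nil => intro h m l _ _ _; simp [pvH, pvM, pvL]
  | cons x xs ih =>
    intro h m l hh hm hl
    by_cases h1 : pvPrio x = "high"
    · have hk : pvKeyA x = 0 := by rw [pvKeyA_char, if_pos h1]
      have step : PySem.List.insertBy (fun a b => decide (pvKeyA a < pvKeyA b)) x (h ++ (m ++ l))
          = (h ++ [x]) ++ (m ++ l) := by
        rw [pvInsertBy_skip _ _ h (m ++ l) (by intro y hy; simp [hk, hh y hy])]
        rw [pvInsertBy_front _ _ (m ++ l) (by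
          intro y hy; rcases List.mem_append.mp hy with hy | hy
          · simp [hk, hm y hy]
          · simp [hk, hl y hy])]
        simp
      simp only [List.foldl_cons, step]
      have hh' : ∀ y ∈ h ++ [x], pvKeyA y = 0 := by
        intro y hy
        rcases List.mem_append.mp hy with hy | hy
        · exact hh y hy
        · simp at hy; subst hy; exact hk
      rw [ih (h ++ [x]) m l hh' hm hl]
      simp [pvH, pvM, pvL, h1]
    · by_cases h2 : pvPrio x = "medium"
      · have hk : pvKeyA x = 1 := by rw [pvKeyA_char, if_neg h1, if_pos h2]
        have step : PySem.List.insertBy (fun a b => decide (pvKeyA a < pvKeyA b)) x (h ++ (m ++ l))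
            = h ++ ((m ++ [x]) ++ l) := by
          rw [pvInsertBy_skip _ _ h (m ++ l) (by intro y hy; simp [hk, hh y hy])]
          rw [pvInsertBy_skip _ _ m l (by intro y hy; simp [hk, hm y hy])]
          rw [pvInsertBy_front _ _ l (by intro y hy; simp [hk, hl y hy])]
          simp
        simp only [List.foldl_cons, step]
        have hm' : ∀ y ∈ m ++ [x], pvKeyA y = 1 := by
          intro y hy
          rcases List.mem_append.mp hy with hy | hy
          · exact hm y hy
          · simp at hy; subst hy; exact hk
        rw [ih h (m ++ [x]) l hh hm' hl]
        simp [pvH, pvM, pvL, h2]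
      · have hk : pvKeyA x = 2 := by rw [pvKeyA_char, if_neg h1, if_neg h2]
        have step : PySem.List.insertBy (fun a b => decide (pvKeyA a < pvKeyA b)) x (h ++ (m ++ l))
            = h ++ (m ++ (l ++ [x])) := by
          rw [pvInsertBy_skip _ _ h (m ++ l) (by intro y hy; simp [hk, hh y hy])]
          rw [pvInsertBy_skip _ _ m l (by intro y hy; simp [hk, hm y hy])]
          rw [pvInsertBy_last _ _ l (by intro y hy; simp [hk, hl y hy])]
        simp only [List.foldl_cons, step]
        have hl' : ∀ y ∈ l ++ [x], pvKeyA y = 2 := by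
          intro y hy
          rcases List.mem_append.mp hy with hy | hy
          · exact hl y hy
          · simp at hy; subst hy; exact hk
        rw [ih h m (l ++ [x]) hh hm hl']
        simp [pvH, pvM, pvL, h1, h2]

theorem pvSortedEq (xs : List (List (String × String))) :
    PySem.List.sorted xs pvKeyA false = pvH xs ++ (pvM xs ++ pvL xs) := by
  rw [PySem.List.sorted_eq_foldl_insertBy]
  have := pvSortFold xs [] [] [] (by simp) (by simp) (by simp)
  simpa using this

theorem pvPrioB_eq_pvPrio (n : List (String × String)) : pvPrioB n = pvPrio n := rfl

theorem pvBucketFold (xs : List (List (String × String))) :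
    ∀ (h m l : List (List (String × String))),
      xs.foldl pvStep (h, m, l) = (h ++ pvH xs, m ++ pvM xs, l ++ pvL xs) := by
  induction xs with
  | nil => intro h m l; simp [pvH, pvM, pvL]
  | cons x xs ih =>
    intro h m l
    rw [List.foldl_cons]
    by_cases h1 : pvPrio x = "high"
    · rw [show pvStep (h, m, l) x = (h ++ [x], m, l) from by simp [pvStep, pvPrioB_eq_pvPrio, h1], ih]
      simp [pvH, pvM, pvL, h1]
    · by_cases h2 : pvPrio x = "medium"
      · rw [show pvStep (h, m, l) x = (h, m ++ [x], l) from by simp [pvStep, pvPrioB_eq_pvPrio, h2], ih]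
        simp [pvH, pvM, pvL, h2]
      · rw [show pvStep (h, m, l) x = (h, m, l ++ [x]) from by simp [pvStep, pvPrioB_eq_pvPrio, h1, h2], ih]
        simp [pvH, pvM, pvL, h1, h2]

-- ===== VERDICT (by name: the statement is the Claim_ definition above) =====
theorem format_nudge_message_spec : Claim_equal_format_nudge_message := by
  intro nudges _ _
  unfold Spec_format_nudge_message format_nudge_message format_nudge_message_alt
  by_cases hnil : nudges = []
  · simp [hnil]
  · rw [if_neg hnil, if_neg hnil]
    rw [pvSortedEq]
    rw [pvBucketFold nudges [] [] []]
    simp only [List.nil_append]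
    rw [PySem.List.foldl_append_singleton_eq_map]
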